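-- pv_equiv track=rewrite | github.com/rudyluis/PROGDAEM | Python/PythonModelosEjercicios/Data_3_10-11-2024_ListasArchivocMAtrices/MatricesClases/Matrices12.py | generar_matriz_borde
-- ===== SOURCE A (Python) =====
-- def generar_matriz_borde(n):
--     matriz = [[0 for _ in range(n)] for _ in range(n)]
--
--     numeros = 1
--     indice = 0
--
--     for i in range(n):
--         matriz[0][i] = numeros
--         numeros+=1
--
--     for i in range(1, n):
--         matriz[i][-1] = numeros
--         numeros+=1
--
--     for i in range(n-2, 0, -1):
--         matriz[n-1][i] = numeros
--         numeros+=1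
--
--     for i in range(n-1, 0, -1):
--         matriz[i][0] = numeros
--         numeros+=1
--
--     return matriz
-- ===== SOURCE B (Python) =====
-- def generar_matriz_borde(n):
--     # Closed-form construction: each row is built directly from per-cell
--     # formulas (no shared counter, no in-place mutation).
--     if n <= 0:
--         return []
--     if n == 1:
--         return [[1]]
--     top = list(range(1, n + 1))
--     mids = [[4 * n - 3 - i] + [0] * (n - 2) + [n + i] for i in range(1, n - 1)]
--     bottom = [3 * n - 2 - j for j in range(n)]
--     return [top] + mids + [bottom]
-- ===== Notes on version B (the rewrite author's own statement) =====
-- stated objective: alternative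
-- what changed: Replaces the zero-matrix plus four sequential counter-driven mutation loops with a direct closed-form construction: each border row is built from per-cell arithmetic formulas, with no shared counter and no in-place writes.
import Mathlib
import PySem

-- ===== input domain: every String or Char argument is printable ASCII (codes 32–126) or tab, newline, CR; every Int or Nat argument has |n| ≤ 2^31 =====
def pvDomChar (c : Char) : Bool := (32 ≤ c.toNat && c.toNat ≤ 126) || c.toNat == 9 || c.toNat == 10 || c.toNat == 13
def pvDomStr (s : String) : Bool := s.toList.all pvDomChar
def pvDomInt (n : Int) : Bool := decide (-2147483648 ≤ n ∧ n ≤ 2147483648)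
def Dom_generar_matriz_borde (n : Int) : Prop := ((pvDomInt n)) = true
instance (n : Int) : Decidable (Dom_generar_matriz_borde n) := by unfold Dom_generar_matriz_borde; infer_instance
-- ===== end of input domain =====

-- B replaces A's four sequential counter-driven mutation loops by a closed-form
-- per-row construction (objective: alternative decomposition, same cost).

-- ===== PORT A =====
-- 'matriz[i][j] = v'; at every call site in this program the row index i is
-- nonnegative and in range and the column index j is in range (possibly -1),
-- where this helper is exact (Python raises only out of range, never reached).
def pvSetCell (M : List (List Int)) (i j v : Int) : List (List Int) :=
  if 0 ≤ i then M.modify i.toNat (fun row => PySem.List.pySetD row j v) else M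

def generar_matriz_borde (n : Int) : List (List Int) :=
  let matriz := (PySem.List.pyRange 0 n 1).map (fun _ => (PySem.List.pyRange 0 n 1).map (fun _ => (0:Int)))
  let s1 := (PySem.List.pyRange 0 n 1).foldl (fun (s : List (List Int) × Int) i => (pvSetCell s.1 0 i s.2, s.2 + 1)) (matriz, 1)
  let s2 := (PySem.List.pyRange 1 n 1).foldl (fun (s : List (List Int) × Int) i => (pvSetCell s.1 i (-1) s.2, s.2 + 1)) s1
  let s3 := (PySem.List.pyRange (n-2) 0 (-1)).foldl (fun (s : List (List Int) × Int) i => (pvSetCell s.1 (n-1) i s.2, s.2 + 1)) s2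
  let s4 := (PySem.List.pyRange (n-1) 0 (-1)).foldl (fun (s : List (List Int) × Int) i => (pvSetCell s.1 i 0 s.2, s.2 + 1)) s3
  s4.1

-- ===== PORT B =====
def generar_matriz_borde_alt (n : Int) : List (List Int) :=
  if n ≤ 0 then []
  else if n = 1 then [[1]]
  else
    let top := PySem.List.pyRange 1 (n+1) 1
    let mids := (PySem.List.pyRange 1 (n-1) 1).map
      (fun i => [4*n-3-i] ++ List.replicate (n-2).toNat (0:Int) ++ [n+i])
    let bottom := (PySem.List.pyRange 0 n 1).map (fun j => 3*n-2-j)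
    (top :: mids) ++ [bottom]

-- ===== PRECONDITION & SPEC =====
def Spec_generar_matriz_borde (n : Int) (out : List (List Int)) : Prop := out = generar_matriz_borde_alt n
instance (n : Int) (out : List (List Int)) : Decidable (Spec_generar_matriz_borde n out) := by unfold Spec_generar_matriz_borde; infer_instance

-- ===== CLAIM (what is proved, stated in full; the proofs are below) =====
def Claim_equal_generar_matriz_borde : Prop := ∀ (n : Int), Dom_generar_matriz_borde n → Spec_generar_matriz_borde n (generar_matriz_borde n)

-- ===== LEMMAS AND PROOFS =====

-- matrix m×m described by an entry function
def pvMD (m : Nat) (f : Nat → Nat → Int) : List (List Int) :=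
  (List.range m).map (fun i => (List.range m).map (fun j => f i j))

-- entry functions of the matrix after each of A's four loops
def pvF1 (i j : Nat) : Int := if i = 0 then (j:Int)+1 else 0
def pvF2 (m k i j : Nat) : Int :=
  if 1 ≤ i ∧ i ≤ k ∧ j = m-1 then (m:Int)+(i:Int) else pvF1 i j
def pvF3 (m t i j : Nat) : Int :=
  if i = m-1 ∧ t < j ∧ j ≤ m-2 then 3*(m:Int)-2-(j:Int) else pvF2 m (m-1) i j
def pvG4 (m t i j : Nat) : Int :=
  if j = 0 ∧ t < i ∧ i ≤ m-1 then 4*(m:Int)-3-(i:Int) else pvF3 m 0 i j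

theorem pvMD_congr (m : Nat) (f g : Nat → Nat → Int)
    (h : ∀ i < m, ∀ j < m, f i j = g i j) : pvMD m f = pvMD m g := by
  unfold pvMD
  refine List.map_congr_left (fun i hi => ?_)
  refine List.map_congr_left (fun j hj => ?_)
  exact h i (List.mem_range.mp hi) j (List.mem_range.mp hj)

theorem pv_map_range_modify {α : Type} (m r : Nat) (h : Nat → α) (f : α → α) :
    ((List.range m).map h).modify r f = (List.range m).map (fun i => if i = r then f (h i) else h i) := by
  apply List.ext_getElem
  · simp
  · intro i h1 h2
    simp only [List.getElem_modify, List.getElem_map, List.getElem_range]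
    by_cases hir : i = r
    · simp [hir]
    · rw [if_neg hir, if_neg (fun hh : r = i => hir hh.symm)]

theorem pv_map_range_set {α : Type} (m c : Nat) (h : Nat → α) (v : α) :
    ((List.range m).map h).set c v = (List.range m).map (fun j => if j = c then v else h j) := by
  apply List.ext_getElem
  · simp
  · intro i h1 h2
    simp only [List.getElem_set, List.getElem_map, List.getElem_range]
    by_cases hic : i = c
    · simp [hic]
    · rw [if_neg (fun hh : c = i => hic hh.symm), if_neg hic]

theorem pvSetCell_MD (m r c : Nat) (g : Nat → Nat → Int) (v : Int) :
    pvSetCell (pvMD m g) (r:Int) (c:Int) v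
      = pvMD m (fun i j => if i = r ∧ j = c then v else g i j) := by
  unfold pvSetCell pvMD
  rw [if_pos (by positivity), Int.toNat_natCast, pv_map_range_modify]
  refine List.map_congr_left (fun i hi => ?_)
  by_cases hir : i = r
  · simp only [if_pos hir, PySem.List.pySetD_natCast, pv_map_range_set]
    refine List.map_congr_left (fun j hj => ?_)
    by_cases hjc : j = c <;> simp [hjc, hir]
  · simp only [if_neg hir]
    refine List.map_congr_left (fun j hj => ?_)
    rw [if_neg (fun hh => hir hh.1)]

theorem pvSetCell_MD_neg (m r : Nat) (hm : 0 < m) (g : Nat → Nat → Int) (v : Int) :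
    pvSetCell (pvMD m g) (r:Int) (-1) v
      = pvMD m (fun i j => if i = r ∧ j = m-1 then v else g i j) := by
  unfold pvSetCell pvMD
  rw [if_pos (by positivity), Int.toNat_natCast, pv_map_range_modify]
  refine List.map_congr_left (fun i hi => ?_)
  by_cases hir : i = r
  · have hlen : ((List.range m).map (fun j => g i j)).length = m := by simp
    have hset : PySem.List.pySetD ((List.range m).map (fun j => g i j)) (-1) v
        = ((List.range m).map (fun j => g i j)).set (m-1) v := by
      simp [PySem.List.pySetD, PySem.List.pySet?, PySem.List.pyIdx?, hlen, show 1 ≤ m from hm]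
    simp only [if_pos hir, hset, pv_map_range_set]
    refine List.map_congr_left (fun j hj => ?_)
    by_cases hjc : j = m-1 <;> simp [hjc, hir]
  · simp only [if_neg hir]
    refine List.map_congr_left (fun j hj => ?_)
    rw [if_neg (fun hh => hir hh.1)]

theorem pvLoop1 (m k : Nat) (hk : k ≤ m) :
    (PySem.List.pyRange 0 (k:Int) 1).foldl
        (fun (s : List (List Int) × Int) i => (pvSetCell s.1 0 i s.2, s.2 + 1))
        (pvMD m (fun _ _ => 0), 1)
      = (pvMD m (fun i j => if i = 0 ∧ j < k then (j:Int)+1 else 0), 1 + (k:Int)) := by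
  induction k with
  | zero =>
      rw [show ((0:Nat):Int) = 0 by norm_num, PySem.List.pyRange_one_eq_nil le_rfl]
      simp
  | succ k ih =>
      have hk' : k ≤ m := by omega
      rw [show ((k+1:Nat):Int) = (k:Int)+1 by push_cast; ring,
          PySem.List.pyRange_one_succ_right (by omega), List.foldl_append,
          ih hk']
      simp only [List.foldl_cons, List.foldl_nil]
      rw [show (0:Int) = ((0:Nat):Int) by norm_num,
          pvSetCell_MD m 0 k]
      rw [Prod.mk.injEq]
      refine ⟨?_, by ring⟩
      apply pvMD_congr
      intro i hi j hj
      split_ifs <;> simp_all <;> omega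

theorem pvLoop2 (m k : Nat) (_hm : 2 ≤ m) (hk : k ≤ m-1) :
    (PySem.List.pyRange 1 (1 + (k:Int)) 1).foldl
        (fun (s : List (List Int) × Int) i => (pvSetCell s.1 i (-1) s.2, s.2 + 1))
        (pvMD m pvF1, (m:Int) + 1)
      = (pvMD m (pvF2 m k), (m:Int) + 1 + (k:Int)) := by
  induction k with
  | zero =>
      rw [show (1:Int) + ((0:Nat):Int) = 1 by norm_num, PySem.List.pyRange_one_eq_nil le_rfl]
      simp only [List.foldl_nil, Nat.cast_zero, add_zero]
      rw [Prod.mk.injEq]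
      refine ⟨?_, rfl⟩
      apply pvMD_congr
      intro i hi j hj
      unfold pvF2
      rw [if_neg (by omega)]
  | succ k ih =>
      have hk' : k ≤ m-1 := by omega
      rw [show (1:Int) + ((k+1:Nat):Int) = (1 + (k:Int)) + 1 by push_cast; ring,
          PySem.List.pyRange_one_succ_right (by omega), List.foldl_append,
          ih hk']
      simp only [List.foldl_cons, List.foldl_nil]
      rw [show (1:Int) + (k:Int) = ((k+1:Nat):Int) by push_cast; ring,
          pvSetCell_MD_neg m (k+1) (by omega)]
      rw [Prod.mk.injEq]
      refine ⟨?_, by push_cast; ring⟩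
      apply pvMD_congr
      intro i hi j hj
      unfold pvF2 pvF1
      split_ifs <;> simp_all <;> omega

theorem pvLoop3 (m t : Nat) (_hm : 2 ≤ m) (ht : t ≤ m-2) :
    (PySem.List.pyRange (t:Int) 0 (-1)).foldl
        (fun (s : List (List Int) × Int) i => (pvSetCell s.1 (((m-1:Nat)):Int) i s.2, s.2 + 1))
        (pvMD m (pvF3 m t), 2*(m:Int) + ((m:Int)-2-(t:Int)))
      = (pvMD m (pvF3 m 0), 3*(m:Int)-2) := by
  induction t with
  | zero =>
      rw [show ((0:Nat):Int) = 0 by norm_num, PySem.List.pyRange_neg_one_eq_nil le_rfl]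
      simp only [List.foldl_nil]
      rw [Prod.mk.injEq]
      exact ⟨rfl, by ring⟩
  | succ t ih =>
      have ht' : t ≤ m-2 := by omega
      rw [PySem.List.pyRange_neg_one_cons (by omega)]
      simp only [List.foldl_cons]
      rw [pvSetCell_MD (m) (m-1) (t+1)]
      have hmat : pvMD m (fun i j => if i = m-1 ∧ j = t+1 then 2*(m:Int) + ((m:Int)-2-((t+1:Nat):Int)) else pvF3 m (t+1) i j)
          = pvMD m (pvF3 m t) := by
        apply pvMD_congr
        intro i hi j hj
        unfold pvF3
        split_ifs <;> push_cast <;> simp_all <;> omega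
      rw [hmat]
      rw [show ((t+1:Nat):Int) - 1 = (t:Int) by push_cast; ring]
      rw [show 2*(m:Int) + ((m:Int)-2-((t+1:Nat):Int)) + 1 = 2*(m:Int) + ((m:Int)-2-(t:Int)) by push_cast; ring]
      exact ih ht'

theorem pvLoop4 (m t : Nat) (_hm : 2 ≤ m) (ht : t ≤ m-1) :
    (PySem.List.pyRange (t:Int) 0 (-1)).foldl
        (fun (s : List (List Int) × Int) i => (pvSetCell s.1 i 0 s.2, s.2 + 1))
        (pvMD m (pvG4 m t), 3*(m:Int)-2 + ((m:Int)-1-(t:Int)))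
      = (pvMD m (pvG4 m 0), 4*(m:Int)-3) := by
  induction t with
  | zero =>
      rw [show ((0:Nat):Int) = 0 by norm_num, PySem.List.pyRange_neg_one_eq_nil le_rfl]
      simp only [List.foldl_nil]
      rw [Prod.mk.injEq]
      exact ⟨rfl, by ring⟩
  | succ t ih =>
      have ht' : t ≤ m-1 := by omega
      rw [PySem.List.pyRange_neg_one_cons (by omega)]
      simp only [List.foldl_cons]
      rw [show (0:Int) = ((0:Nat):Int) by norm_num,
          pvSetCell_MD m (t+1) 0]
      have hmat : pvMD m (fun i j => if i = t+1 ∧ j = 0 then 3*(m:Int)-2 + ((m:Int)-1-((t+1:Nat):Int)) else pvG4 m (t+1) i j)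
          = pvMD m (pvG4 m t) := by
        apply pvMD_congr
        intro i hi j hj
        unfold pvG4
        split_ifs <;> push_cast <;> simp_all <;> omega
      rw [hmat]
      rw [show ((t+1:Nat):Int) - 1 = (t:Int) by push_cast; ring]
      rw [show 3*(m:Int)-2 + ((m:Int)-1-((t+1:Nat):Int)) + 1 = 3*(m:Int)-2 + ((m:Int)-1-(t:Int)) by push_cast; ring]
      exact ih ht'

theorem pvA_eq_MD (k : Nat) :
    generar_matriz_borde ((k+2 : Nat) : Int) = pvMD (k+2) (pvG4 (k+2) 0) := by
  have hr0 : PySem.List.pyRange 0 ((k+2:Nat):Int) 1 = (List.range (k+2)).map (fun j => ((j:Nat):Int)) := by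
    rw [PySem.List.pyRange_one, show (((k+2:Nat):Int)-0).toNat = k+2 from by push_cast; omega]
    simp
  have hm0 : (PySem.List.pyRange 0 ((k+2:Nat):Int) 1).map
        (fun _ => (PySem.List.pyRange 0 ((k+2:Nat):Int) 1).map (fun _ => (0:Int)))
      = pvMD (k+2) (fun _ _ => (0:Int)) := by
    rw [hr0]; unfold pvMD; simp [List.map_map, Function.comp_def]
  simp only [generar_matriz_borde]
  rw [hm0, pvLoop1 (k+2) (k+2) le_rfl]
  rw [show (pvMD (k+2) (fun i j => if i = 0 ∧ j < k+2 then (j:Int)+1 else 0)) = pvMD (k+2) pvF1 from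
        pvMD_congr _ _ _ (by intro i hi j hj; unfold pvF1; split_ifs <;> simp_all <;> omega),
      show (1:Int)+((k+2:Nat):Int) = ((k+2:Nat):Int)+1 from by ring]
  have h2 := pvLoop2 (k+2) (k+1) (by omega) (by omega)
  rw [show (1:Int)+((k+1:Nat):Int) = ((k+2:Nat):Int) from by push_cast; ring] at h2
  rw [h2, show ((k+2:Nat):Int)+1+((k+1:Nat):Int) = 2*((k+2:Nat):Int) from by push_cast; ring]
  rw [show ((k+2:Nat):Int)-2 = ((k:Nat):Int) from by push_cast; ring,
      show ((k+2:Nat):Int)-1 = ((k+1:Nat):Int) from by push_cast; ring]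
  have h3 := pvLoop3 (k+2) k (by omega) (by omega)
  rw [show ((k+2)-1 : Nat) = (k+1 : Nat) from rfl] at h3
  rw [show 2*((k+2:Nat):Int) + (((k+2:Nat):Int)-2-((k:Nat):Int)) = 2*((k+2:Nat):Int) from by push_cast; ring] at h3
  rw [show pvMD (k+2) (pvF3 (k+2) k) = pvMD (k+2) (pvF2 (k+2) (k+1)) from
        pvMD_congr _ _ _ (by intro i hi j hj; unfold pvF3; rw [if_neg (by omega)]; rfl)] at h3
  rw [h3]
  have h4 := pvLoop4 (k+2) (k+1) (by omega) (by omega)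
  rw [show 3*((k+2:Nat):Int)-2 + (((k+2:Nat):Int)-1-((k+1:Nat):Int)) = 3*((k+2:Nat):Int)-2 from by push_cast; ring] at h4
  rw [show pvMD (k+2) (pvG4 (k+2) (k+1)) = pvMD (k+2) (pvF3 (k+2) 0) from
        pvMD_congr _ _ _ (by intro i hi j hj; unfold pvG4; rw [if_neg (by omega)])] at h4
  rw [h4]

theorem pv_map_range_succ2 {α : Type} (k : Nat) (f : Nat → α) :
    (List.range (k+2)).map f = f 0 :: ((List.range k).map (fun x => f (x+1)) ++ [f (k+1)]) := by
  rw [show (k+2:Nat) = (k+1)+1 from rfl, List.range_succ, List.range_succ_eq_map]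
  simp [List.map_map, Function.comp_def]

theorem pvB_eq_MD (k : Nat) :
    generar_matriz_borde_alt ((k+2 : Nat) : Int) = pvMD (k+2) (pvG4 (k+2) 0) := by
  unfold generar_matriz_borde_alt
  rw [if_neg (by omega), if_neg (by omega)]
  have hsub2 : ((k+2:Nat):Int) - 2 = ((k:Nat):Int) := by push_cast; ring
  have htop : PySem.List.pyRange 1 (((k+2:Nat):Int)+1) 1
      = (List.range (k+2)).map (fun j => pvG4 (k+2) 0 0 j) := by
    rw [PySem.List.pyRange_one]
    rw [show (((k+2:Nat):Int)+1-1).toNat = k+2 from by push_cast; omega]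
    refine List.map_congr_left (fun j hj => ?_)
    have hj' := List.mem_range.mp hj
    unfold pvG4 pvF3 pvF2 pvF1
    simp only [show k+2-1 = k+1 from rfl, show k+2-2 = k from rfl]
    split_ifs <;> first | omega | (simp_all; omega) | simp_all
  have hmids : (PySem.List.pyRange 1 (((k+2:Nat):Int)-1) 1).map
        (fun i => [4*((k+2:Nat):Int)-3-i] ++ List.replicate ((((k+2:Nat):Int)-2).toNat) (0:Int) ++ [((k+2:Nat):Int)+i])
      = (List.range k).map (fun x => (List.range (k+2)).map (fun j => pvG4 (k+2) 0 (x+1) j)) := by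
    rw [PySem.List.pyRange_one, show (((k+2:Nat):Int)-1-1).toNat = k from by push_cast; omega,
        hsub2, Int.toNat_natCast, List.map_map]
    refine List.map_congr_left (fun x hx => ?_)
    have hx' := List.mem_range.mp hx
    show [4*((k+2:Nat):Int)-3-(1+(x:Int))] ++ List.replicate k (0:Int) ++ [((k+2:Nat):Int)+(1+(x:Int))] = _
    rw [pv_map_range_succ2 k (fun j => pvG4 (k+2) 0 (x+1) j)]
    rw [List.singleton_append, List.cons_append]
    congr 1
    · unfold pvG4 pvF3 pvF2 pvF1
      simp only [show k+2-1 = k+1 from rfl, show k+2-2 = k from rfl]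
      split_ifs <;> first | omega | (simp_all; omega) | simp_all
    congr 1
    · symm
      rw [List.eq_replicate_iff]
      refine ⟨by simp, ?_⟩
      intro b hb
      simp only [List.mem_map, List.mem_range] at hb
      obtain ⟨j, hj, hbj⟩ := hb
      rw [← hbj]
      unfold pvG4 pvF3 pvF2 pvF1
      simp only [show k+2-1 = k+1 from rfl, show k+2-2 = k from rfl]
      split_ifs <;> first | omega | (simp_all; omega) | simp_all
    · congr 1
      unfold pvG4 pvF3 pvF2 pvF1
      simp only [show k+2-1 = k+1 from rfl, show k+2-2 = k from rfl]
      split_ifs <;> first | omega | (simp_all; omega) | simp_all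
  have hbot : (PySem.List.pyRange 0 ((k+2:Nat):Int) 1).map (fun j => 3*((k+2:Nat):Int)-2-j)
      = (List.range (k+2)).map (fun j => pvG4 (k+2) 0 (k+1) j) := by
    rw [PySem.List.pyRange_one, show (((k+2:Nat):Int)-0).toNat = k+2 from by push_cast; omega,
        List.map_map]
    refine List.map_congr_left (fun j hj => ?_)
    have hj' := List.mem_range.mp hj
    show 3*((k+2:Nat):Int)-2-(0+(j:Int)) = pvG4 (k+2) 0 (k+1) j
    unfold pvG4 pvF3 pvF2 pvF1
    simp only [show k+2-1 = k+1 from rfl, show k+2-2 = k from rfl]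
    split_ifs <;> first | omega | (simp_all; omega) | simp_all
  show (PySem.List.pyRange 1 (((k+2:Nat):Int)+1) 1 ::
      (PySem.List.pyRange 1 (((k+2:Nat):Int)-1) 1).map
        (fun i => [4*((k+2:Nat):Int)-3-i] ++ List.replicate ((((k+2:Nat):Int)-2).toNat) (0:Int) ++ [((k+2:Nat):Int)+i]))
      ++ [(PySem.List.pyRange 0 ((k+2:Nat):Int) 1).map (fun j => 3*((k+2:Nat):Int)-2-j)]
    = pvMD (k+2) (pvG4 (k+2) 0)
  rw [htop, hmids, hbot]
  unfold pvMD
  rw [pv_map_range_succ2 k (fun i => (List.range (k+2)).map (fun j => pvG4 (k+2) 0 i j))]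
  rw [List.cons_append]

theorem pvA_nonpos (n : Int) (h : n ≤ 0) : generar_matriz_borde n = [] := by
  unfold generar_matriz_borde
  rw [PySem.List.pyRange_one_eq_nil (by omega : n ≤ 0),
      PySem.List.pyRange_one_eq_nil (by omega : n ≤ 1),
      PySem.List.pyRange_neg_one_eq_nil (by omega : n-2 ≤ 0),
      PySem.List.pyRange_neg_one_eq_nil (by omega : n-1 ≤ 0)]
  simp

-- ===== VERDICT (by name: the statement is the Claim_ definition above) =====
theorem generar_matriz_borde_spec : Claim_equal_generar_matriz_borde := by
  intro n _
  unfold Spec_generar_matriz_borde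
  by_cases h0 : n ≤ 0
  · rw [pvA_nonpos n h0]
    unfold generar_matriz_borde_alt
    simp [h0]
  · rcases hm : n.toNat with _ | m
    · omega
    · rcases m with _ | k
      · have h1 : n = 1 := by omega
        subst h1; decide
      · have h2 : n = ((k+2 : Nat) : Int) := by omega
        rw [h2, pvA_eq_MD, pvB_eq_MD]
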